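-- pv_equiv track=rewrite | github.com/XiaoQuark/Kris-version-The-Perfect-Crab-Introduction-to-Programming | 042_challenge_2_exercise.py | create_groups_to_check
-- ===== SOURCE A (Python) =====
-- def create_groups_to_check(num):
--   groups_to_check = []
--   # for loop: i = index, num=grid size
--   for i in range(num):
--     # create row: list of tuples (non mutable list)
--     # i will increase at next loop
--     # for loop increases j every time we add (i, j) to row
--     # until it reaches value of num
--     row = [(i, j) for j in range(num)]
--     #  append row list to groups list
--     groups_to_check.append(row)
--
--   # same thing as before, but i increases and j stays th same
--   for j in range(num):
--     column = [(i, j) for i in range(num)]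
--     groups_to_check.append(column)
--
--   # positive diagonal quite simple to understand
--   diagonal_1 = [(i, i) for i in range(num)]
--   groups_to_check.append(diagonal_1)
--
--   # negative diagonal: x coordinate increases with loop
--   # y coordinate equals num - 1 - current value of x coordinate
--   # example: num = 4
--   # i == 0 -> (0, 4 - 1 - 0) -> (0, 3)
--   # i == 1 -> (1, 4 - 1 - 1) -> (1, 2)
--   # i == 2 -> (2, 4 - 1 - 2) -> (2, 1)
--   # i == 3 -> (3, 4 - 1 - 3) -> (3, 0)
--   # remmeber: range(num) num is not included in range
--   diagonal_2 = [(j, num - 1 - j) for j in range(num)]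
--   groups_to_check.append(diagonal_2)
--   return groups_to_check
-- ===== SOURCE B (Python) =====
-- def create_groups_to_check(num):
--     # one bucket per row, one per column, plus the two diagonal buckets,
--     # filled in a single pass over all cells of the grid
--     groups = [[] for _ in range(num)] + [[] for _ in range(num)] + [[], []]
--     for i in range(num):
--         for j in range(num):
--             cell = (i, j)
--             groups[i].append(cell)
--             groups[num + j].append(cell)
--             if i == j:
--                 groups[2 * num].append(cell)
--             if i + j == num - 1:
--                 groups[2 * num + 1].append(cell)
--     return groups
-- ===== Notes on version B (the rewrite author's own statement) =====
-- stated objective: alternative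
-- what changed: A generates each group by its own comprehension in four staged passes; B pre-allocates one bucket per row, column and diagonal and fills them all in a single pass over the grid cells, classifying each cell into its row bucket, column bucket and (conditionally) the two diagonal buckets.
import Mathlib
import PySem

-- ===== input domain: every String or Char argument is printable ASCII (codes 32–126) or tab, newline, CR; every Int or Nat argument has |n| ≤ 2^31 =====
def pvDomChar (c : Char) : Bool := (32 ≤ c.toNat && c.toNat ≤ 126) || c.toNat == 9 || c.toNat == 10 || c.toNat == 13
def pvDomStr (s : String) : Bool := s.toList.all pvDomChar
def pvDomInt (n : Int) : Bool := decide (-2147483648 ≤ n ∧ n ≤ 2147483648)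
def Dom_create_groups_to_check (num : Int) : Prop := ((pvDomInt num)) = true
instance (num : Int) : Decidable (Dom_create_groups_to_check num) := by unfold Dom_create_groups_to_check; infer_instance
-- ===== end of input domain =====

-- B classifies every grid cell into pre-allocated row/column/diagonal buckets in a single
-- pass over the cells, instead of A's four independent generation passes (objective: alternative).

-- ===== PORT A =====
-- literal transliteration: two append-loops over range(num), then the two diagonals appended
def create_groups_to_check (num : Int) : List (List (Int × Int)) :=
  let groups0 : List (List (Int × Int)) := []
  let groups1 := (PySem.List.pyRange 0 num 1).foldl
    (fun acc i => acc ++ [(PySem.List.pyRange 0 num 1).map (fun j => ((i, j) : Int × Int))]) groups0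
  let groups2 := (PySem.List.pyRange 0 num 1).foldl
    (fun acc j => acc ++ [(PySem.List.pyRange 0 num 1).map (fun i => ((i, j) : Int × Int))]) groups1
  let diagonal_1 := (PySem.List.pyRange 0 num 1).map (fun i => ((i, i) : Int × Int))
  let groups3 := groups2 ++ [diagonal_1]
  let diagonal_2 := (PySem.List.pyRange 0 num 1).map (fun j => ((j, num - 1 - j) : Int × Int))
  groups3 ++ [diagonal_2]

-- ===== PORT B =====
-- loop body of Source B: the four conditional appends for one cell (i, j); the bucket indices
-- i, num + j, 2*num, 2*num + 1 are nonnegative whenever the loops run, so .toNat is exact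
def pvStep (num : Int) (gs : List (List (Int × Int))) (i j : Int) : List (List (Int × Int)) :=
  let cell : Int × Int := (i, j)
  let gs1 := gs.modify i.toNat (fun b => b ++ [cell])
  let gs2 := gs1.modify (num + j).toNat (fun b => b ++ [cell])
  let gs3 := if i = j then gs2.modify (2 * num).toNat (fun b => b ++ [cell]) else gs2
  if i + j = num - 1 then gs3.modify (2 * num + 1).toNat (fun b => b ++ [cell]) else gs3
def create_groups_to_check_alt (num : Int) : List (List (Int × Int)) :=
  let groups : List (List (Int × Int)) :=
    (PySem.List.pyRange 0 num 1).map (fun _ => [])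
      ++ (PySem.List.pyRange 0 num 1).map (fun _ => []) ++ [[], []]
  (PySem.List.pyRange 0 num 1).foldl (fun gs i =>
    (PySem.List.pyRange 0 num 1).foldl (fun gs j => pvStep num gs i j) gs) groups

-- ===== PRECONDITION & SPEC =====
def Spec_create_groups_to_check (num : Int) (out : List (List (Int × Int))) : Prop := out = create_groups_to_check_alt num
instance (num : Int) (out : List (List (Int × Int))) : Decidable (Spec_create_groups_to_check num out) := by unfold Spec_create_groups_to_check; infer_instance

-- ===== CLAIM (what is proved, stated in full; the proofs are below) =====
def Claim_equal_create_groups_to_check : Prop := ∀ (num : Int), Dom_create_groups_to_check num → Spec_create_groups_to_check num (create_groups_to_check num)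

-- ===== LEMMAS AND PROOFS =====

-- what one pvStep appends to bucket k for the cell c
def pvContrib (num : Int) (k : Nat) (c : Int × Int) : List (Int × Int) :=
  (if c.1.toNat = k then [c] else []) ++ (if (num + c.2).toNat = k then [c] else [])
    ++ (if c.1 = c.2 ∧ (2 * num).toNat = k then [c] else [])
    ++ (if c.1 + c.2 = num - 1 ∧ (2 * num + 1).toNat = k then [c] else [])
theorem pvStep_getElem? (num : Int) (gs : List (List (Int × Int))) (i j : Int) (k : Nat) :
    (pvStep num gs i j)[k]? = gs[k]?.map (fun b => b ++ pvContrib num k (i, j)) := by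
  rcases hg : gs[k]? with _ | b
  · simp only [pvStep]
    split_ifs <;> simp [List.getElem?_modify, hg]
  · simp only [pvStep, pvContrib]
    split_ifs <;> simp_all [List.append_assoc]
theorem foldl_pvStep_getElem? (num : Int) (cs : List (Int × Int))
    (gs : List (List (Int × Int))) (k : Nat) :
    (cs.foldl (fun g c => pvStep num g c.1 c.2) gs)[k]?
      = gs[k]?.map (fun b => b ++ cs.flatMap (pvContrib num k)) := by
  induction cs generalizing gs with
  | nil => simp
  | cons c cs ih =>
    simp only [List.foldl_cons, ih, pvStep_getElem?, Option.map_map]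
    cases gs[k]? <;> simp [Function.comp, List.append_assoc]
theorem nested_foldl_eq_flat (num : Int) (ys xs : List Int) (init : List (List (Int × Int))) :
    ys.foldl (fun gs i => xs.foldl (fun gs j => pvStep num gs i j) gs) init
      = (ys.flatMap (fun i => xs.map (fun j => (i, j)))).foldl
          (fun g c => pvStep num g c.1 c.2) init := by
  induction ys generalizing init with
  | nil => rfl
  | cons y ys ih =>
    simp only [List.foldl_cons, List.flatMap_cons, List.foldl_append, ih, List.foldl_map]
theorem range_flatMap_select {α : Type} (n k : Nat) (f : Nat → List α) :
    (List.range n).flatMap (fun a => if a = k then f a else []) = if k < n then f k else [] := by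
  induction n with
  | zero => simp
  | succ m ih =>
    rw [List.range_succ, List.flatMap_append, ih]
    by_cases h : m = k
    · subst h; simp
    · simp only [List.flatMap_cons, List.flatMap_nil, if_neg h]
      split_ifs <;> first | (exfalso; omega) | simp
theorem pvContrib_row (n a b k : Nat) (ha : a < n) (hb : b < n) (hk : k < n) :
    pvContrib (n : Int) k ((a : Int), (b : Int)) = if a = k then [((a : Int), (b : Int))] else [] := by
  simp only [pvContrib]
  split_ifs <;> first | (exfalso; omega) | rfl
theorem pvContrib_col (n a b k : Nat) (ha : a < n) (hb : b < n) (hk1 : n ≤ k) (hk2 : k < n + n) :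
    pvContrib (n : Int) k ((a : Int), (b : Int)) = if b = k - n then [((a : Int), (b : Int))] else [] := by
  simp only [pvContrib]
  split_ifs <;> first | (exfalso; omega) | rfl
theorem pvContrib_diag1 (n a b : Nat) (hn : 0 < n) (ha : a < n) (hb : b < n) :
    pvContrib (n : Int) (n + n) ((a : Int), (b : Int)) = if b = a then [((a : Int), (b : Int))] else [] := by
  simp only [pvContrib]
  split_ifs <;> first | (exfalso; omega) | rfl
theorem pvContrib_diag2 (n a b : Nat) (ha : a < n) (hb : b < n) :
    pvContrib (n : Int) (n + n + 1) ((a : Int), (b : Int)) = if b = n - 1 - a then [((a : Int), (b : Int))] else [] := by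
  simp only [pvContrib]
  split_ifs <;> first | (exfalso; omega) | rfl
-- named blocks of the result
def pvRowOf (n a : Nat) : List (Int × Int) := (List.range n).map (fun b : Nat => ((a : Int), (b : Int)))
def pvColOf (n b : Nat) : List (Int × Int) := (List.range n).map (fun a : Nat => ((a : Int), (b : Int)))
def pvD1 (n : Nat) : List (Int × Int) := (List.range n).map (fun a : Nat => ((a : Int), (a : Int)))
def pvD2 (n : Nat) : List (Int × Int) := (List.range n).map (fun b : Nat => ((b : Int), (n : Int) - 1 - (b : Int)))

theorem A_blocks (n : Nat) :
    create_groups_to_check (n : Int)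
      = (List.range n).map (pvRowOf n) ++ (List.range n).map (pvColOf n) ++ [pvD1 n, pvD2 n] := by
  simp only [create_groups_to_check, PySem.List.pyRange_zero_natCast,
    PySem.List.foldl_append_singleton_eq_map, List.foldl_map, List.map_map]
  simp only [Function.comp_def, List.append_assoc, List.nil_append]
  rfl

theorem B_getElem? (n : Nat) (k : Nat) :
    (create_groups_to_check_alt (n : Int))[k]?
      = (List.replicate (n + n + 2) ([] : List (Int × Int)))[k]?.map
          (fun b => b ++ (List.range n).flatMap (fun a : Nat =>
            (List.range n).flatMap (fun b : Nat => pvContrib (n : Int) k ((a : Int), (b : Int))))) := by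
  have hinit : ((List.range n).map (fun a : Nat => (a : Int))).map (fun _ => ([] : List (Int × Int)))
      ++ ((List.range n).map (fun a : Nat => (a : Int))).map (fun _ => ([] : List (Int × Int)))
      ++ ([[], []] : List (List (Int × Int)))
      = List.replicate (n + n + 2) [] := by
    simp only [List.map_map]
    rw [show ((fun _ => ([] : List (Int × Int))) ∘ fun a : Nat => (a : Int))
          = Function.const Nat [] from rfl, List.map_const, List.length_range]
    rw [show n + n + 2 = n + (n + 2) from rfl, List.replicate_add, List.replicate_add,
      List.append_assoc]
    rfl
  simp only [create_groups_to_check_alt, PySem.List.pyRange_zero_natCast, nested_foldl_eq_flat]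
  rw [hinit, foldl_pvStep_getElem?]
  rw [List.flatMap_map, List.flatMap_assoc]
  simp only [List.flatMap_map, List.map_map, Function.comp_def]

theorem cellsum_row (n k : Nat) (hk : k < n) :
    (List.range n).flatMap (fun a : Nat => (List.range n).flatMap
      (fun b : Nat => pvContrib (n : Int) k ((a : Int), (b : Int)))) = pvRowOf n k := by
  rw [List.flatMap_congr (fun (a : Nat) ha => List.flatMap_congr
    (fun (b : Nat) hb => pvContrib_row n a b k (List.mem_range.1 ha) (List.mem_range.1 hb) hk))]
  rw [List.flatMap_congr (fun (a : Nat) _ => show (List.range n).flatMap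
      (fun b : Nat => if a = k then [((a : Int), (b : Int))] else [])
      = if a = k then pvRowOf n a else [] from by
    by_cases h : a = k <;> simp [h, pvRowOf, ← List.map_eq_flatMap])]
  rw [range_flatMap_select n k, if_pos hk]

theorem cellsum_col (n k : Nat) (hk1 : n ≤ k) (hk2 : k < n + n) :
    (List.range n).flatMap (fun a : Nat => (List.range n).flatMap
      (fun b : Nat => pvContrib (n : Int) k ((a : Int), (b : Int)))) = pvColOf n (k - n) := by
  rw [List.flatMap_congr (fun (a : Nat) ha => List.flatMap_congr
    (fun (b : Nat) hb => pvContrib_col n a b k (List.mem_range.1 ha) (List.mem_range.1 hb) hk1 hk2))]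
  rw [List.flatMap_congr (fun (a : Nat) _ => range_flatMap_select n (k - n)
    (fun b : Nat => [((a : Int), (b : Int))]))]
  simp only [if_pos (show k - n < n by omega)]
  simp [pvColOf, ← List.map_eq_flatMap]

theorem cellsum_diag1 (n : Nat) (hn : 0 < n) :
    (List.range n).flatMap (fun a : Nat => (List.range n).flatMap
      (fun b : Nat => pvContrib (n : Int) (n + n) ((a : Int), (b : Int)))) = pvD1 n := by
  rw [List.flatMap_congr (fun (a : Nat) ha => List.flatMap_congr
    (fun (b : Nat) hb => pvContrib_diag1 n a b hn (List.mem_range.1 ha) (List.mem_range.1 hb)))]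
  rw [List.flatMap_congr (fun (a : Nat) _ => range_flatMap_select n a
    (fun b : Nat => [((a : Int), (b : Int))]))]
  rw [List.flatMap_congr (fun (a : Nat) ha => if_pos (List.mem_range.1 ha))]
  simp [pvD1, ← List.map_eq_flatMap]

theorem cellsum_diag2 (n : Nat) :
    (List.range n).flatMap (fun a : Nat => (List.range n).flatMap
      (fun b : Nat => pvContrib (n : Int) (n + n + 1) ((a : Int), (b : Int)))) = pvD2 n := by
  rw [List.flatMap_congr (fun (a : Nat) ha => List.flatMap_congr
    (fun (b : Nat) hb => pvContrib_diag2 n a b (List.mem_range.1 ha) (List.mem_range.1 hb)))]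
  rw [List.flatMap_congr (fun (a : Nat) _ => range_flatMap_select n (n - 1 - a)
    (fun b : Nat => [((a : Int), (b : Int))]))]
  rw [List.flatMap_congr (fun (a : Nat) ha => if_pos (show n - 1 - a < n by
    have := List.mem_range.1 ha; omega))]
  rw [List.flatMap_congr (fun (a : Nat) ha => show [((a : Int), ((n - 1 - a : Nat) : Int))]
      = [((a : Int), (n : Int) - 1 - (a : Int))] from by
    have ha' := List.mem_range.1 ha
    have h2 : ((n - 1 - a : Nat) : Int) = (n : Int) - 1 - (a : Int) := by omega
    rw [h2])]
  simp [pvD2, ← List.map_eq_flatMap]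

theorem main_pos (n : Nat) (hn : 0 < n) :
    create_groups_to_check (n : Int) = create_groups_to_check_alt (n : Int) := by
  symm
  apply List.ext_getElem?
  intro k
  rw [A_blocks, B_getElem?, List.getElem?_replicate]
  rcases lt_or_ge k n with hk | hk
  · rw [if_pos (by omega), cellsum_row n k hk]
    rw [List.getElem?_append, if_pos (show k < ((List.range n).map (pvRowOf n)
        ++ (List.range n).map (pvColOf n)).length by simp; omega),
      List.getElem?_append, if_pos (show k < ((List.range n).map (pvRowOf n)).length by
        simpa using hk),
      List.getElem?_map, List.getElem?_range hk]
    simp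
  · rcases lt_or_ge k (n + n) with hk2 | hk2
    · rw [if_pos (by omega), cellsum_col n k hk hk2]
      rw [List.getElem?_append, if_pos (show k < ((List.range n).map (pvRowOf n)
          ++ (List.range n).map (pvColOf n)).length by simp; omega),
        List.getElem?_append_right (by simpa using hk), List.getElem?_map, List.length_map,
        List.length_range, List.getElem?_range (by omega)]
      simp
    · rcases lt_or_ge k (n + n + 1) with hk3 | hk3
      · have hkk : k = n + n := by omega
        subst hkk
        rw [if_pos (by omega), cellsum_diag1 n hn]
        rw [List.getElem?_append_right (by simp), show n + n - ((List.range n).map (pvRowOf n)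
          ++ (List.range n).map (pvColOf n)).length = 0 from by simp]
        simp
      · rcases lt_or_ge k (n + n + 2) with hk4 | hk4
        · have hkk : k = n + n + 1 := by omega
          subst hkk
          rw [if_pos (by omega), cellsum_diag2 n]
          rw [List.getElem?_append_right (by simp), show n + n + 1 - ((List.range n).map (pvRowOf n)
            ++ (List.range n).map (pvColOf n)).length = 1 from by simp]
          simp
        · rw [if_neg (by omega)]
          simp only [Option.map_none]
          rw [List.getElem?_eq_none]
          simp
          omega

-- num ≤ 0: no cells, A returns the two empty diagonals, B's buckets are exactly [[], []]
theorem main_nonpos (num : Int) (h : ¬ 0 < num) :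
    create_groups_to_check num = create_groups_to_check_alt num := by
  simp [create_groups_to_check, create_groups_to_check_alt,
    PySem.List.pyRange_one_eq_nil (show num ≤ 0 by omega)]

-- ===== VERDICT (by name: the statement is the Claim_ definition above) =====
theorem create_groups_to_check_spec : Claim_equal_create_groups_to_check := by
  intro num _
  unfold Spec_create_groups_to_check
  by_cases hpos : 0 < num
  · obtain ⟨n, rfl⟩ : ∃ n : Nat, num = (n : Int) := ⟨num.toNat, (Int.toNat_of_nonneg hpos.le).symm⟩
    exact main_pos n (by exact_mod_cast hpos)
  · exact main_nonpos num hpos
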